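-- pv_equiv track=rewrite | github.com/wjx-git/IllegalTextDetection | preprocess.py | char_segment
-- ===== SOURCE A (Python) =====
-- def char_segment(string):
--     """
--     把句子按字分开，中文按字分，英文按单词
--     :param string:
--     :return:
--     """
--     chars = []
--     en_char = ''
--     for token in string:
--         if (u'\u0041' <= token <= u'\u005a') or (u'\u0061' <= token <= u'\u007a'):  # 英文
--             if token.isupper():
--                 chars.append(en_char.lower())
--                 en_char = token
--             else:
--                 en_char += token
--         else:
--             if en_char:
--                 chars.append(en_char.lower())
--                 en_char = ''
--             chars.append(token)
--     if en_char:
--         chars.append(en_char.lower())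
--     return [w for w in chars if len(w.strip()) > 0]
-- ===== SOURCE B (Python) =====
-- def char_segment(string):
--     toks, i, n = [], 0, len(string)
--     while i < n:
--         c = string[i]
--         if 'A' <= c <= 'Z' or 'a' <= c <= 'z':
--             j = i + 1
--             while j < n and 'a' <= string[j] <= 'z':
--                 j += 1
--             toks.append(string[i:j].lower())
--             i = j
--         else:
--             if c.strip():
--                 toks.append(c)
--             i += 1
--     return toks
-- ===== Notes on version B (the rewrite author's own statement) =====
-- stated objective: simpler
-- what changed: Replaced A's en_char accumulator/flush state machine plus a final filtering pass by a single maximal-munch tokenizer that, at each letter, scans ahead over the following lowercase run and appends the lowered slice directly, filtering blanks inline.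
import Mathlib
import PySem

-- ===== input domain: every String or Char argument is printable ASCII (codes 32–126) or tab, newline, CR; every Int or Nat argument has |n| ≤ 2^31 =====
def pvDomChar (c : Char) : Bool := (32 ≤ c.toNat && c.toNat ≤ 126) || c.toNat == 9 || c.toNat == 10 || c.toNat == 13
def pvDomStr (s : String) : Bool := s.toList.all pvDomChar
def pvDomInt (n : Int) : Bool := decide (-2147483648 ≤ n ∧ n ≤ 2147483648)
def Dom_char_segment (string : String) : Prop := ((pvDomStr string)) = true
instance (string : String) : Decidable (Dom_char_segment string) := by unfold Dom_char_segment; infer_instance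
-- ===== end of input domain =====

-- B replaces A's en_char accumulator state machine by a maximal-munch tokenizer that jumps
-- over each letter run in an inner scan (objective: simpler; return value only, no mutation).

-- ===== PORT A =====
-- A's letter test '\u0041' <= token <= '\u005a' or '\u0061' <= token <= '\u007a' (code-point compare)
def pvIsLetterA (c : Char) : Bool :=
  (65 ≤ c.toNat && c.toNat ≤ 90) || (97 ≤ c.toNat && c.toNat ≤ 122)

-- the for-loop over the string, state = (accumulated chars are emitted in order, en_char);
-- returns the 'chars' list built from this state on, including the final flush of en_char
def csLoopA (en : List Char) : List Char → List (List Char)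
  | [] => if en ≠ [] then [PySem.Chars.lower en] else []
  | c :: t =>
    if pvIsLetterA c then
      if PySem.Chars.isupper c then
        PySem.Chars.lower en :: csLoopA [c] t
      else
        csLoopA (en ++ [c]) t
    else
      (if en ≠ [] then [PySem.Chars.lower en] else []) ++ ([c] :: csLoopA [] t)

def char_segment (string : String) : List String :=
  ((csLoopA [] string.toList).filter
    (fun w => decide (0 < (PySem.Chars.strip w).length))).map String.ofList

-- ===== PORT B =====
def pvIsLowerB (c : Char) : Bool := 97 ≤ c.toNat && c.toNat ≤ 122

-- B's while-loop: at a letter, the inner while advances j over 'a'..'z' (= takeWhile/dropWhile)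
-- and appends the lowered slice; at a non-letter, appends the char iff it strips non-empty
def tokB : List Char → List (List Char)
  | [] => []
  | c :: t =>
    if pvIsLetterA c then
      PySem.Chars.lower (c :: t.takeWhile pvIsLowerB) :: tokB (t.dropWhile pvIsLowerB)
    else
      (if PySem.Chars.strip [c] ≠ [] then [[c]] else []) ++ tokB t
termination_by l => l.length
decreasing_by
  · simpa using Nat.lt_succ_of_le (List.length_dropWhile_le _ _)
  · simp

def char_segment_alt (string : String) : List String :=
  (tokB string.toList).map String.ofList

-- ===== PRECONDITION & SPEC =====
def Spec_char_segment (string : String) (out : List String) : Prop := out = char_segment_alt string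
instance (string : String) (out : List String) : Decidable (Spec_char_segment string out) := by unfold Spec_char_segment; infer_instance

-- ===== CLAIM (what is proved, stated in full; the proofs are below) =====
def Claim_equal_char_segment : Prop := ∀ (string : String), Dom_char_segment string → Spec_char_segment string (char_segment string)

-- ===== LEMMAS AND PROOFS =====

def pvKeep (w : List Char) : Bool := decide (0 < (PySem.Chars.strip w).length)

def pvEmit (w : List Char) : List (List Char) :=
  if w = [] then [] else [PySem.Chars.lower w]


theorem isupper_eq (c : Char) : PySem.Chars.isupper c = (65 ≤ c.toNat && c.toNat ≤ 90) := by
  rw [PySem.Chars.isupper]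
  have h1 : ('A' ≤ c) ↔ (65 ≤ c.toNat) := by rw [Char.le_def, UInt32.le_iff_toNat_le]; rfl
  have h2 : (c ≤ 'Z') ↔ (c.toNat ≤ 90) := by rw [Char.le_def, UInt32.le_iff_toNat_le]; rfl
  simp [h1, h2]

theorem toNat_ofNat_letter (n : Nat) (h1 : 97 ≤ n) (h2 : n ≤ 122) : (Char.ofNat n).toNat = n := by
  rw [Char.ofNat, dif_pos (Or.inl (by omega))]; rfl

theorem lowerChar_letter (c : Char) (h : pvIsLetterA c = true) :
    97 ≤ (PySem.Chars.lowerChar c).toNat ∧ (PySem.Chars.lowerChar c).toNat ≤ 122 := by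
  simp [pvIsLetterA] at h
  rw [PySem.Chars.lowerChar, isupper_eq]
  rcases h with h | h
  · rw [if_pos (by simp; omega), toNat_ofNat_letter _ (by omega) (by omega)]; omega
  · rw [if_neg (by simp; omega)]; omega

theorem isspace_false (c : Char) (h1 : 97 ≤ c.toNat) (h2 : c.toNat ≤ 122) :
    PySem.Chars.isspace c = false := by
  simp [PySem.Chars.isspace]; omega

theorem dropWhile_isspace_eq_self (l : List Char) (h : ∀ c ∈ l, PySem.Chars.isspace c = false) :
    List.dropWhile PySem.Chars.isspace l = l := by
  cases l with
  | nil => rfl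
  | cons c t => rw [List.dropWhile_cons_of_neg (by simp [h c (by simp)])]

theorem strip_eq_self (l : List Char) (h : ∀ c ∈ l, PySem.Chars.isspace c = false) :
    PySem.Chars.strip l = l := by
  rw [PySem.Chars.strip, PySem.Chars.lstrip, PySem.Chars.rstrip,
    dropWhile_isspace_eq_self l h, dropWhile_isspace_eq_self _ (by simpa using h), List.reverse_reverse]

theorem pvKeep_lower_letters (w : List Char) (hw : w ≠ []) (h : w.all pvIsLetterA) :
    pvKeep (PySem.Chars.lower w) = true := by
  rw [List.all_eq_true] at h
  have hs : ∀ c ∈ PySem.Chars.lower w, PySem.Chars.isspace c = false := by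
    intro c hc
    rw [PySem.Chars.lower] at hc
    obtain ⟨a, ha, rfl⟩ := List.mem_map.mp hc
    obtain ⟨g1, g2⟩ := lowerChar_letter a (h a ha)
    exact isspace_false _ g1 g2
  rw [pvKeep, strip_eq_self _ hs]
  simp [PySem.Chars.lower, List.length_pos_iff, hw]

theorem filt_emit (w : List Char) (h : w.all pvIsLetterA) :
    List.filter pvKeep (if w ≠ [] then [PySem.Chars.lower w] else []) = pvEmit w := by
  by_cases hw : w = []
  · simp [hw, pvEmit]
  · simp [hw, pvEmit, List.filter, pvKeep_lower_letters w hw h]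

theorem lowerB_letterA (c : Char) (h : pvIsLowerB c = true) : pvIsLetterA c = true := by
  simp [pvIsLowerB] at h; simp [pvIsLetterA]; omega

theorem merge_tokB (l : List Char) :
    pvEmit (l.takeWhile pvIsLowerB) ++ tokB (l.dropWhile pvIsLowerB) = tokB l := by
  cases l with
  | nil => simp [pvEmit, tokB]
  | cons c t =>
    by_cases hc : pvIsLowerB c = true
    · rw [List.takeWhile_cons_of_pos hc, List.dropWhile_cons_of_pos hc]
      rw [show tokB (c :: t) = PySem.Chars.lower (c :: t.takeWhile pvIsLowerB) :: tokB (t.dropWhile pvIsLowerB) from by rw [tokB, if_pos (lowerB_letterA c hc)]]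
      simp [pvEmit]
    · rw [List.takeWhile_cons_of_neg (by simp [hc]), List.dropWhile_cons_of_neg (by simp [hc])]
      simp [pvEmit]

theorem isupper_not_lowerB (c : Char) (h : PySem.Chars.isupper c = true) : pvIsLowerB c = false := by
  rw [isupper_eq] at h; simp at h; simp [pvIsLowerB]; omega

theorem letter_not_upper_lowerB (c : Char) (hL : pvIsLetterA c = true)
    (hU : PySem.Chars.isupper c = false) : pvIsLowerB c = true := by
  rw [isupper_eq] at hU; simp [pvIsLetterA] at hL; simp at hU; simp [pvIsLowerB]; omega

theorem not_letter_not_lowerB (c : Char) (h : pvIsLetterA c = false) : pvIsLowerB c = false := by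
  simp [pvIsLetterA] at h; simp [pvIsLowerB]; omega

theorem main_loop (l : List Char) (en : List Char) (h : en.all pvIsLetterA) :
    List.filter pvKeep (csLoopA en l)
      = pvEmit (en ++ l.takeWhile pvIsLowerB) ++ tokB (l.dropWhile pvIsLowerB) := by
  induction l generalizing en with
  | nil =>
    rw [show csLoopA en [] = if en ≠ [] then [PySem.Chars.lower en] else [] from rfl,
      filt_emit en h]
    simp [tokB]
  | cons c t ih =>
    by_cases hL : pvIsLetterA c = true
    · by_cases hU : PySem.Chars.isupper c = true
      · have hlow := isupper_not_lowerB c hU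
        rw [show csLoopA en (c :: t) = PySem.Chars.lower en :: csLoopA [c] t from by
          rw [csLoopA, if_pos hL, if_pos hU]]
        rw [List.takeWhile_cons_of_neg (by simp [hlow]), List.dropWhile_cons_of_neg (by simp [hlow])]
        rw [show tokB (c :: t) = PySem.Chars.lower (c :: t.takeWhile pvIsLowerB) :: tokB (t.dropWhile pvIsLowerB) from by rw [tokB, if_pos hL]]
        have ihc := ih [c] (by simp [hL])
        by_cases hen : en = []
        · subst hen
          rw [show List.filter pvKeep (PySem.Chars.lower [] :: csLoopA [c] t)
              = List.filter pvKeep (csLoopA [c] t) from by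
            simp [List.filter, PySem.Chars.lower, pvKeep, PySem.Chars.strip, PySem.Chars.lstrip, PySem.Chars.rstrip]]
          rw [ihc]
          simp [pvEmit]
        · rw [show List.filter pvKeep (PySem.Chars.lower en :: csLoopA [c] t)
              = PySem.Chars.lower en :: List.filter pvKeep (csLoopA [c] t) from by
            rw [List.filter_cons, if_pos (pvKeep_lower_letters en hen h)]]
          rw [ihc]
          simp [pvEmit, hen]
      · have hlow := letter_not_upper_lowerB c hL (by simpa using hU)
        rw [show csLoopA en (c :: t) = csLoopA (en ++ [c]) t from by
          rw [csLoopA, if_pos hL, if_neg (by simp [hU])]]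
        rw [ih (en ++ [c]) (by simp [h, hL])]
        rw [List.takeWhile_cons_of_pos hlow, List.dropWhile_cons_of_pos hlow]
        simp [pvEmit]
    · have hlow := not_letter_not_lowerB c (by simpa using hL)
      rw [show csLoopA en (c :: t)
          = (if en ≠ [] then [PySem.Chars.lower en] else []) ++ ([c] :: csLoopA [] t) from by
        rw [csLoopA, if_neg (by simp [hL])]]
      rw [List.filter_append, filt_emit en h, List.filter_cons]
      rw [List.takeWhile_cons_of_neg (by simp [hlow]), List.dropWhile_cons_of_neg (by simp [hlow])]
      rw [show tokB (c :: t) = (if PySem.Chars.strip [c] ≠ [] then [[c]] else []) ++ tokB t from by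
        rw [tokB, if_neg (by simp [hL])]]
      rw [ih [] (by simp)]
      simp only [List.nil_append] at *
      rw [merge_tokB t]
      by_cases hk : PySem.Chars.strip [c] = []
      · simp [pvKeep, hk]
      · simp [pvKeep, hk, List.length_pos_iff]

-- ===== VERDICT (by name: the statement is the Claim_ definition above) =====
theorem char_segment_spec : Claim_equal_char_segment := by
  intro s _
  unfold Spec_char_segment char_segment char_segment_alt
  have h := main_loop s.toList [] (by simp [List.all_nil])
  simp only [List.nil_append] at h
  rw [show ((csLoopA [] s.toList).filter fun w => decide (0 < (PySem.Chars.strip w).length)) = List.filter pvKeep (csLoopA [] s.toList) from rfl, h, merge_tokB]
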